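-- pv_equiv track=rewrite | github.com/httppsdouq29/TT_ATTT | bai24.py | result
-- ===== SOURCE A (Python) =====
-- import math
--
-- def is_prime(a):
--     if a <= 1:
--         return False
--     for i in range(2, int(math.sqrt(a)) + 1):
--         if a % i == 0:
--             return False
--     return True
--
-- def result(number_a, number_b, S1, S2):
--     S = []
--     for i in S1:
--         for j in S2:
--             sum = i + j
--             if sum >= number_a and sum <= number_b and is_prime(sum) and sum not in S:
--                 S.append(sum)
--     return S
-- ===== SOURCE B (Python) =====
-- import math
--
-- def _is_prime(n):
--     if n < 2:
--         return False
--     if n % 2 == 0: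
--         return n == 2
--     for d in range(3, math.isqrt(n) + 1, 2):
--         if n % d == 0:
--             return False
--     return True
--
-- def _bisect_left(a, x):
--     l, r = 0, len(a)
--     while l < r:
--         m = (l + r) // 2
--         if a[m] < x:
--             l = m + 1
--         else:
--             r = m
--     return l
--
-- def _bisect_right(a, x):
--     l, r = 0, len(a)
--     while l < r:
--         m = (l + r) // 2
--         if a[m] <= x:
--             l = m + 1
--         else:
--             r = m
--     return l
--
-- def result(number_a, number_b, S1, S2):
--     order = sorted(range(len(S2)), key=lambda k: S2[k])
--     svals = [S2[k] for k in order]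
--     seen = set()
--     out = []
--     for i in S1:
--         l = _bisect_left(svals, number_a - i)
--         r = _bisect_right(svals, number_b - i)
--         for k in sorted(order[l:r]):
--             s = i + S2[k]
--             if s not in seen:
--                 seen.add(s)
--                 if _is_prime(s):
--                     out.append(s)
--     return out
-- ===== Notes on version B (the rewrite author's own statement) =====
-- stated objective: faster
-- what changed: B sorts S2 once together with its original indices and binary-searches the value window [number_a-i, number_b-i] for each i, so only in-window pairs are visited (in original pair order); sums are deduped with a hash set before any primality work, and primality uses odd-only trial division bounded by isqrt, while A scans every pair, runs full trial division per pair and scans its output list per pair.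
import Mathlib
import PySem

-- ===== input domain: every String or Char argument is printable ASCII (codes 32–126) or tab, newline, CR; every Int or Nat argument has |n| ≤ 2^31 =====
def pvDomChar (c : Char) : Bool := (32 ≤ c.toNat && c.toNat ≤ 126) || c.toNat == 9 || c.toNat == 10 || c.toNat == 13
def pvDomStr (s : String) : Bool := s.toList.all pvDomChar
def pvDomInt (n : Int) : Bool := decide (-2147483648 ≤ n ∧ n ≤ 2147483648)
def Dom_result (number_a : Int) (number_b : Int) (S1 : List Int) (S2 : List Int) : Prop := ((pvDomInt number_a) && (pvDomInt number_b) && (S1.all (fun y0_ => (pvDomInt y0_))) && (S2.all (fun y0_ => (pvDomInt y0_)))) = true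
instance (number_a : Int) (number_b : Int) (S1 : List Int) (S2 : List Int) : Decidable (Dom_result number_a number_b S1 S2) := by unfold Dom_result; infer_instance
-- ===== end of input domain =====

-- B sorts S2 once (with original indices) and binary-searches the in-range window per i,
-- dedupes sums with a hash set before primality, and uses odd-only bounded trial division;
-- the return value is proved identical to A's.

-- ===== PORT A =====
-- is_prime(a): trial division over range(2, int(math.sqrt(a))+1).
-- int(math.sqrt(a)) is ported as Nat.sqrt a.toNat: exact here, since on the reached
-- arguments (a ≥ 2, a a sum of two domain ints so a ≤ 2^32) the float sqrt is floor-exact.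
def isPrimeA (a : Int) : Bool :=
  if a ≤ 1 then false
  else (PySem.List.pyRange 2 (((Nat.sqrt a.toNat : Int)) + 1) 1).all
         (fun i => !(PySem.Int.mod a i == 0))

def result (number_a : Int) (number_b : Int) (S1 : List Int) (S2 : List Int) : List Int :=
  S1.foldl (fun S i =>
    S2.foldl (fun S j =>
      let s := i + j
      if number_a ≤ s ∧ s ≤ number_b ∧ isPrimeA s = true ∧ ¬ s ∈ S then S ++ [s] else S) S) []

-- ===== PORT B =====
-- _is_prime(n): 2 via the even case, then odd trial divisors range(3, isqrt(n)+1, 2).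
-- math.isqrt(n) is exactly Nat.sqrt n.toNat (n ≥ 2 on the reached arguments).
def isPrimeB (n : Int) : Bool :=
  if n < 2 then false
  else if PySem.Int.mod n 2 == 0 then n == 2
  else (PySem.List.pyRange 3 ((Nat.sqrt n.toNat : Int) + 1) 2).all
         (fun d => !(PySem.Int.mod n d == 0))

-- _bisect_left's while loop (a[m] is always in range on reached calls; pyGetD is exact there)
def blLoop (a : List Int) (x : Int) (l : Int) (r : Int) : Int :=
  if h : l < r then
    let m := PySem.Int.floordiv (l + r) 2
    if PySem.List.pyGetD a m 0 < x then blLoop a x (m + 1) r else blLoop a x l m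
  else l
termination_by (r - l).toNat
decreasing_by
  · have hb := PySem.Int.floordiv_two_mid_bounds (le_of_lt h)
    omega
  · have hb := PySem.Int.floordiv_two_mid_bounds (le_of_lt h)
    have hlt : PySem.Int.floordiv (l + r) 2 < r := by
      rw [PySem.Int.floordiv_lt_iff_lt_mul (by omega)]; omega
    omega

def bisectL (a : List Int) (x : Int) : Int := blLoop a x 0 (PySem.List.len a)

-- _bisect_right's while loop
def brLoop (a : List Int) (x : Int) (l : Int) (r : Int) : Int :=
  if h : l < r then
    let m := PySem.Int.floordiv (l + r) 2
    if PySem.List.pyGetD a m 0 ≤ x then brLoop a x (m + 1) r else brLoop a x l m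
  else l
termination_by (r - l).toNat
decreasing_by
  · have hb := PySem.Int.floordiv_two_mid_bounds (le_of_lt h)
    omega
  · have hb := PySem.Int.floordiv_two_mid_bounds (le_of_lt h)
    have hlt : PySem.Int.floordiv (l + r) 2 < r := by
      rw [PySem.Int.floordiv_lt_iff_lt_mul (by omega)]; omega
    omega

def bisectR (a : List Int) (x : Int) : Int := brLoop a x 0 (PySem.List.len a)

def result_alt (number_a : Int) (number_b : Int) (S1 : List Int) (S2 : List Int) : List Int :=
  let order := PySem.List.sorted (PySem.List.pyRange 0 (PySem.List.len S2) 1)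
                 (fun k => PySem.List.pyGetD S2 k 0) false
  let svals := order.map (fun k => PySem.List.pyGetD S2 k 0)
  (S1.foldl (fun (st : PySem.Set Int × List Int) i =>
      let l := bisectL svals (number_a - i)
      let r := bisectR svals (number_b - i)
      (PySem.List.sorted (PySem.List.slice order (some l) (some r)) (fun x => x) false).foldl
        (fun (st : PySem.Set Int × List Int) k =>
          let s := i + PySem.List.pyGetD S2 k 0
          if ¬ s ∈ st.1 then
            (PySem.Set.add st.1 s, if isPrimeB s then st.2 ++ [s] else st.2)
          else st) st)
    (PySem.Set.empty, [])).2

-- ===== PRECONDITION & SPEC =====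
def Spec_result (number_a : Int) (number_b : Int) (S1 : List Int) (S2 : List Int) (out : List Int) : Prop := out = result_alt number_a number_b S1 S2
instance (number_a : Int) (number_b : Int) (S1 : List Int) (S2 : List Int) (out : List Int) : Decidable (Spec_result number_a number_b S1 S2 out) := by unfold Spec_result; infer_instance

-- ===== CLAIM (what is proved, stated in full; the proofs are below) =====
def Claim_equal_result : Prop := ∀ (number_a : Int) (number_b : Int) (S1 : List Int) (S2 : List Int), Dom_result number_a number_b S1 S2 → Spec_result number_a number_b S1 S2 (result number_a number_b S1 S2)

-- ===== LEMMAS AND PROOFS =====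

-- "a has no divisor d with 2 ≤ d and d*d ≤ a"
def NoSmallDiv (a : Int) : Prop := ∀ d : Int, 2 ≤ d → d * d ≤ a → ¬ d ∣ a

-- d ≤ isqrt(a) says exactly d*d ≤ a (both trial-division bounds)
lemma le_sqrt_iff (a d : Int) (ha : 0 ≤ a) (hd : 0 ≤ d) :
    d ≤ (Nat.sqrt a.toNat : Int) ↔ d * d ≤ a := by
  rw [show d = (d.toNat : Int) from (Int.toNat_of_nonneg hd).symm,
      show a = (a.toNat : Int) from (Int.toNat_of_nonneg ha).symm]
  constructor
  · intro h
    have h' : d.toNat ≤ Nat.sqrt a.toNat := by exact_mod_cast h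
    rw [Nat.le_sqrt] at h'
    exact_mod_cast h'
  · intro h
    have h' : d.toNat * d.toNat ≤ a.toNat := by exact_mod_cast h
    rw [← Nat.le_sqrt] at h'
    exact_mod_cast h'

lemma isPrimeA_iff (a : Int) (ha : 2 ≤ a) : isPrimeA a = true ↔ NoSmallDiv a := by
  unfold isPrimeA NoSmallDiv
  rw [if_neg (by omega), List.all_eq_true]
  constructor
  · intro h d hd2 hdd
    have hmem : d ∈ PySem.List.pyRange 2 ((Nat.sqrt a.toNat : Int) + 1) 1 := by
      rw [PySem.List.mem_pyRange_one]
      have := (le_sqrt_iff a d (by omega) (by omega)).mpr hdd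
      exact ⟨hd2, by omega⟩
    have := h d hmem
    rw [← PySem.Int.mod_eq_zero_iff_dvd]
    simpa using this
  · intro h i hi
    rw [PySem.List.mem_pyRange_one] at hi
    have hii : i * i ≤ a := (le_sqrt_iff a i (by omega) (by omega)).mp (by omega)
    have := h i hi.1 hii
    rw [← PySem.Int.mod_eq_zero_iff_dvd] at this
    simpa using this

lemma isPrimeB_iff (a : Int) (ha : 2 ≤ a) : isPrimeB a = true ↔ NoSmallDiv a := by
  unfold isPrimeB
  rw [if_neg (by omega)]
  by_cases h2 : PySem.Int.mod a 2 = 0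
  · have hdvd : (2:Int) ∣ a := (PySem.Int.mod_eq_zero_iff_dvd a 2).mp h2
    rw [if_pos (by simpa using h2)]
    by_cases ha2 : a = 2
    · subst ha2
      constructor
      · intro _ d hd2 hdd
        exact absurd hdd (by nlinarith)
      · intro _; decide
    · have : (a == 2) = false := by simpa using ha2
      rw [this]
      refine iff_of_false (by simp) ?_
      unfold NoSmallDiv
      push Not
      refine ⟨2, by omega, ?_, hdvd⟩
      rcases hdvd with ⟨c, hc⟩
      omega
  · rw [if_neg (by simpa using h2), List.all_eq_true]
    have hodd : ¬ (2:Int) ∣ a := fun hd => h2 ((PySem.Int.mod_eq_zero_iff_dvd a 2).mpr hd)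
    unfold NoSmallDiv
    constructor
    · intro hall d hd2 hdd
      by_cases hde : (2:Int) ∣ d
      · -- an even divisor of the odd a is impossible
        intro hdvd
        exact hodd (dvd_trans hde hdvd)
      · have hmem : d ∈ PySem.List.pyRange 3 ((Nat.sqrt a.toNat : Int) + 1) 2 := by
          rw [PySem.List.mem_pyRange_iff_of_pos (by omega)]
          have := (le_sqrt_iff a d (by omega) (by omega)).mpr hdd
          exact ⟨by omega, by omega, by omega⟩
        have := hall d hmem
        rw [← PySem.Int.mod_eq_zero_iff_dvd]
        simpa using this
    · intro h d hmem
      rw [PySem.List.mem_pyRange_iff_of_pos (by omega)] at hmem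
      have hdd : d * d ≤ a := (le_sqrt_iff a d (by omega) (by omega)).mp (by omega)
      have := h d (by omega) hdd
      rw [← PySem.Int.mod_eq_zero_iff_dvd] at this
      simpa using this

lemma prime_eq (a : Int) : isPrimeA a = isPrimeB a := by
  by_cases h : a < 2
  · unfold isPrimeA isPrimeB
    rw [if_pos (by omega), if_pos (by omega)]
  · rw [Bool.eq_iff_iff, isPrimeA_iff a (by omega), isPrimeB_iff a (by omega)]

-- binary-search invariant: positions left of the result hold values < x (blLoop) / ≤ x (brLoop)
lemma blLoop_iff (a : List Int) (x : Int) (hs : a.Pairwise (· ≤ ·)) :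
    ∀ (fuel : Nat) (l r : Int), (r - l).toNat = fuel → 0 ≤ l → l ≤ r → r ≤ (a.length : Int) →
      (∀ (p : Nat) (hp : p < a.length), (p : Int) < l → a[p] < x) →
      (∀ (p : Nat) (hp : p < a.length), r ≤ (p : Int) → x ≤ a[p]) →
      0 ≤ blLoop a x l r ∧ blLoop a x l r ≤ (a.length : Int) ∧
        ∀ (p : Nat) (hp : p < a.length), ((p : Int) < blLoop a x l r ↔ a[p] < x) := by
  have hmono : ∀ (p q : Nat) (hp : p < a.length) (hq : q < a.length), p ≤ q → a[p] ≤ a[q] := by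
    intro p q hp hq hpq
    rcases Nat.lt_or_eq_of_le hpq with h | h
    · exact List.pairwise_iff_getElem.mp hs p q hp hq h
    · subst h; exact le_refl _
  intro fuel
  induction fuel using Nat.strong_induction_on with
  | _ fuel ih =>
    intro l r hk h0 hlr hrl hleft hright
    rw [blLoop]
    by_cases h : l < r
    · rw [dif_pos h]
      have hb := PySem.Int.floordiv_two_mid_bounds (le_of_lt h)
      have hmr : PySem.Int.floordiv (l + r) 2 < r := by
        rw [PySem.Int.floordiv_lt_iff_lt_mul (by omega)]; omega
      set m := PySem.Int.floordiv (l + r) 2 with hmdef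
      have hmlen : m.toNat < a.length := by omega
      have hget : PySem.List.pyGetD a m 0 = a[m.toNat] :=
        PySem.List.pyGetD_eq_getElem a 0 (by omega) (by omega)
      by_cases hcmp : PySem.List.pyGetD a m 0 < x
      · rw [if_pos hcmp]
        refine ih (r - (m + 1)).toNat (by omega) (m + 1) r rfl (by omega) (by omega) hrl ?_ hright
        intro p hp hpl
        have h1 : a[p] ≤ a[m.toNat] := hmono p m.toNat hp hmlen (by omega)
        rw [hget] at hcmp
        omega
      · rw [if_neg hcmp]
        refine ih (m - l).toNat (by omega) l m rfl h0 (by omega) (by omega) hleft ?_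
        intro p hp hpr
        have h1 : a[m.toNat] ≤ a[p] := hmono m.toNat p hmlen hp (by omega)
        rw [hget] at hcmp
        omega
    · rw [dif_neg h]
      refine ⟨h0, by omega, ?_⟩
      intro p hp
      constructor
      · exact hleft p hp
      · intro hax
        by_contra hpl
        have := hright p hp (by omega)
        omega

lemma brLoop_iff (a : List Int) (x : Int) (hs : a.Pairwise (· ≤ ·)) :
    ∀ (fuel : Nat) (l r : Int), (r - l).toNat = fuel → 0 ≤ l → l ≤ r → r ≤ (a.length : Int) →
      (∀ (p : Nat) (hp : p < a.length), (p : Int) < l → a[p] ≤ x) →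
      (∀ (p : Nat) (hp : p < a.length), r ≤ (p : Int) → x < a[p]) →
      0 ≤ brLoop a x l r ∧ brLoop a x l r ≤ (a.length : Int) ∧
        ∀ (p : Nat) (hp : p < a.length), ((p : Int) < brLoop a x l r ↔ a[p] ≤ x) := by
  have hmono : ∀ (p q : Nat) (hp : p < a.length) (hq : q < a.length), p ≤ q → a[p] ≤ a[q] := by
    intro p q hp hq hpq
    rcases Nat.lt_or_eq_of_le hpq with h | h
    · exact List.pairwise_iff_getElem.mp hs p q hp hq h
    · subst h; exact le_refl _
  intro fuel
  induction fuel using Nat.strong_induction_on with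
  | _ fuel ih =>
    intro l r hk h0 hlr hrl hleft hright
    rw [brLoop]
    by_cases h : l < r
    · rw [dif_pos h]
      have hb := PySem.Int.floordiv_two_mid_bounds (le_of_lt h)
      have hmr : PySem.Int.floordiv (l + r) 2 < r := by
        rw [PySem.Int.floordiv_lt_iff_lt_mul (by omega)]; omega
      set m := PySem.Int.floordiv (l + r) 2 with hmdef
      have hmlen : m.toNat < a.length := by omega
      have hget : PySem.List.pyGetD a m 0 = a[m.toNat] :=
        PySem.List.pyGetD_eq_getElem a 0 (by omega) (by omega)
      by_cases hcmp : PySem.List.pyGetD a m 0 ≤ x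
      · rw [if_pos hcmp]
        refine ih (r - (m + 1)).toNat (by omega) (m + 1) r rfl (by omega) (by omega) hrl ?_ hright
        intro p hp hpl
        have h1 : a[p] ≤ a[m.toNat] := hmono p m.toNat hp hmlen (by omega)
        rw [hget] at hcmp
        omega
      · rw [if_neg hcmp]
        refine ih (m - l).toNat (by omega) l m rfl h0 (by omega) (by omega) hleft ?_
        intro p hp hpr
        have h1 : a[m.toNat] ≤ a[p] := hmono m.toNat p hmlen hp (by omega)
        rw [hget] at hcmp
        omega
    · rw [dif_neg h]
      refine ⟨h0, by omega, ?_⟩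
      intro p hp
      constructor
      · exact hleft p hp
      · intro hax
        by_contra hpl
        have := hright p hp (by omega)
        omega

lemma bisectL_spec (a : List Int) (x : Int) (hs : a.Pairwise (· ≤ ·)) :
    0 ≤ bisectL a x ∧ bisectL a x ≤ (a.length : Int) ∧
      ∀ (p : Nat) (hp : p < a.length), ((p : Int) < bisectL a x ↔ a[p] < x) := by
  unfold bisectL
  have hlen : PySem.List.len a = (a.length : Int) := by simp [PySem.List.len]
  rw [hlen]
  exact blLoop_iff a x hs ((a.length : Int) - 0).toNat 0 (a.length : Int) rfl le_rfl
    (by omega) le_rfl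
    (fun p hp hpl => absurd hpl (by omega))
    (fun p hp hpr => absurd hpr (by omega))

lemma bisectR_spec (a : List Int) (x : Int) (hs : a.Pairwise (· ≤ ·)) :
    0 ≤ bisectR a x ∧ bisectR a x ≤ (a.length : Int) ∧
      ∀ (p : Nat) (hp : p < a.length), ((p : Int) < bisectR a x ↔ a[p] ≤ x) := by
  unfold bisectR
  have hlen : PySem.List.len a = (a.length : Int) := by simp [PySem.List.len]
  rw [hlen]
  exact brLoop_iff a x hs ((a.length : Int) - 0).toNat 0 (a.length : Int) rfl le_rfl
    (by omega) le_rfl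
    (fun p hp hpl => absurd hpl (by omega))
    (fun p hp hpr => absurd hpr (by omega))

-- the row B visits (sorted window of indices) is exactly the in-window filter of range(len(S2))
lemma row_eq (S2 order svals : List Int) (lo hi : Int)
    (horder : order = PySem.List.sorted (PySem.List.pyRange 0 (PySem.List.len S2) 1)
        (fun k => PySem.List.pyGetD S2 k 0) false)
    (hsvals : svals = order.map (fun k => PySem.List.pyGetD S2 k 0)) :
    PySem.List.sorted (PySem.List.slice order (some (bisectL svals lo)) (some (bisectR svals hi)))
        (fun x => x) false
      = (PySem.List.pyRange 0 (PySem.List.len S2) 1).filter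
          (fun k => decide (lo ≤ PySem.List.pyGetD S2 k 0 ∧ PySem.List.pyGetD S2 k 0 ≤ hi)) := by
  have hpermO : order.Perm (PySem.List.pyRange 0 (PySem.List.len S2) 1) := by
    rw [horder]; exact PySem.List.sorted_perm _ _ _
  have hnodupO : order.Nodup := hpermO.nodup_iff.mpr (PySem.List.nodup_pyRange_one _ _)
  have hmemO : ∀ k, k ∈ order ↔ (0 ≤ k ∧ k < PySem.List.len S2) := by
    intro k; rw [hpermO.mem_iff, PySem.List.mem_pyRange_one]
  have hsp : svals.Pairwise (· ≤ ·) := by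
    rw [hsvals, horder]
    exact PySem.List.sorted_map_key_pairwise _ _
  obtain ⟨hL0, hLlen, hLiff⟩ := bisectL_spec svals lo hsp
  obtain ⟨hR0, hRlen, hRiff⟩ := bisectR_spec svals hi hsp
  set L := bisectL svals lo with hLdef
  set R := bisectR svals hi with hRdef
  have hlenv : svals.length = order.length := by rw [hsvals]; exact List.length_map _
  have hkeyget : ∀ (p : Nat) (hp : p < order.length),
      svals[p]'(by omega) = PySem.List.pyGetD S2 (order[p]) 0 := by
    intro p hp
    simp [hsvals]
  have hmem_slice : ∀ k, (k ∈ PySem.List.slice order (some L) (some R) ↔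
      (k ∈ order ∧ lo ≤ PySem.List.pyGetD S2 k 0 ∧ PySem.List.pyGetD S2 k 0 ≤ hi)) := by
    intro k
    rw [PySem.List.slice_toNat order hL0 hR0]
    constructor
    · intro hk
      obtain ⟨q, hq, hqe⟩ := List.mem_iff_getElem.mp hk
      have hqlen : L.toNat + q < order.length := by
        simp [List.length_take, List.length_drop] at hq
        omega
      have hqe' : order[L.toNat + q] = k := by
        rw [List.getElem_take, List.getElem_drop] at hqe
        exact hqe
      have hqR : L.toNat + q < R.toNat := by
        simp [List.length_take, List.length_drop] at hq
        omega
      have hlo : lo ≤ PySem.List.pyGetD S2 k 0 := by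
        have hniff := hLiff (L.toNat + q) (by omega)
        rw [hkeyget (L.toNat + q) hqlen, hqe'] at hniff
        have : ¬ ((L.toNat + q : Nat) : Int) < L := by omega
        omega
      have hhi : PySem.List.pyGetD S2 k 0 ≤ hi := by
        have hniff := hRiff (L.toNat + q) (by omega)
        rw [hkeyget (L.toNat + q) hqlen, hqe'] at hniff
        have : ((L.toNat + q : Nat) : Int) < R := by omega
        omega
      exact ⟨hqe' ▸ List.getElem_mem hqlen, hlo, hhi⟩
    · rintro ⟨hkO, hlo, hhi⟩
      obtain ⟨p, hp, hpe⟩ := List.mem_iff_getElem.mp hkO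
      have hLp : ¬ ((p : Int) < L) := by
        have hniff := hLiff p (by omega)
        rw [hkeyget p hp, hpe] at hniff
        omega
      have hRp : (p : Int) < R := by
        have hniff := hRiff p (by omega)
        rw [hkeyget p hp, hpe] at hniff
        omega
      refine List.mem_iff_getElem.mpr ⟨p - L.toNat, ?_, ?_⟩
      · simp [List.length_take, List.length_drop]
        omega
      · rw [List.getElem_take, List.getElem_drop]
        have hidx : L.toNat + (p - L.toNat) = p := by omega
        simp only [hidx]
        exact hpe
  have hsliceNodup : (PySem.List.slice order (some L) (some R)).Nodup := by
    rw [PySem.List.slice_toNat order hL0 hR0]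
    exact ((List.take_sublist _ _).trans (List.drop_sublist _ _)).nodup hnodupO
  have hfilNodup : ((PySem.List.pyRange 0 (PySem.List.len S2) 1).filter
      (fun k => decide (lo ≤ PySem.List.pyGetD S2 k 0 ∧ PySem.List.pyGetD S2 k 0 ≤ hi))).Nodup :=
    (PySem.List.nodup_pyRange_one _ _).filter _
  have hperm : ((PySem.List.pyRange 0 (PySem.List.len S2) 1).filter
      (fun k => decide (lo ≤ PySem.List.pyGetD S2 k 0 ∧ PySem.List.pyGetD S2 k 0 ≤ hi))).Perm
      (PySem.List.slice order (some L) (some R)) := by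
    rw [List.perm_ext_iff_of_nodup hfilNodup hsliceNodup]
    intro k
    rw [List.mem_filter, hmem_slice k, hmemO k, PySem.List.mem_pyRange_one, decide_eq_true_eq]
  have hfilPair : (((PySem.List.pyRange 0 (PySem.List.len S2) 1).filter
      (fun k => decide (lo ≤ PySem.List.pyGetD S2 k 0 ∧ PySem.List.pyGetD S2 k 0 ≤ hi)))).Pairwise
      (fun a b => (fun (x : Int) => x) a < (fun (x : Int) => x) b) :=
    (PySem.List.pairwise_lt_pyRange_one _ _).filter _
  exact PySem.List.sorted_eq_of_perm_of_pairwise_lt _ _ _ hperm hfilPair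

-- A's inner loop over S2 is the loop over the in-window indices, in index order
lemma rowA_eq (na nb i : Int) (S2 : List Int) (S : List Int) :
    S2.foldl (fun S j =>
        let s := i + j
        if na ≤ s ∧ s ≤ nb ∧ isPrimeB s = true ∧ ¬ s ∈ S then S ++ [s] else S) S
      = ((PySem.List.pyRange 0 (PySem.List.len S2) 1).filter
           (fun k => decide (na - i ≤ PySem.List.pyGetD S2 k 0 ∧ PySem.List.pyGetD S2 k 0 ≤ nb - i))).foldl
          (fun S k =>
            let s := i + PySem.List.pyGetD S2 k 0
            if isPrimeB s = true ∧ ¬ s ∈ S then S ++ [s] else S) S := by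
  rw [← PySem.List.foldl_pyRange_zero_pyGetD S2 0 _ S]
  rw [PySem.List.foldl_congr_mem _ _
      (fun acc k =>
        if na - i ≤ PySem.List.pyGetD S2 k 0 ∧ PySem.List.pyGetD S2 k 0 ≤ nb - i then
          (let s := i + PySem.List.pyGetD S2 k 0
           if isPrimeB s = true ∧ ¬ s ∈ acc then acc ++ [s] else acc)
        else acc) S ?_]
  · exact PySem.List.foldl_ite_eq_foldl_filter _ _ _ _
  · intro acc k hk
    dsimp only
    by_cases h1 : na - i ≤ PySem.List.pyGetD S2 k 0 ∧ PySem.List.pyGetD S2 k 0 ≤ nb - i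
    · rw [if_pos h1]
      by_cases h2 : isPrimeB (i + PySem.List.pyGetD S2 k 0) = true ∧
          ¬ (i + PySem.List.pyGetD S2 k 0) ∈ acc
      · rw [if_pos h2, if_pos ⟨by omega, by omega, h2.1, h2.2⟩]
      · rw [if_neg h2, if_neg (fun hx => h2 ⟨hx.2.2.1, hx.2.2.2⟩)]
    · rw [if_neg (fun hx => h1 ⟨by omega, by omega⟩), if_neg h1]

-- dedup-loop invariant: B's output component equals A's accumulator, and A's accumulator is
-- exactly the prime members of B's seen-set
lemma inner_inv (i : Int) (S2 : List Int) :
    ∀ (idxs : List Int) (S : List Int) (st : PySem.Set Int × List Int),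
      st.2 = S → (∀ x : Int, x ∈ S ↔ x ∈ st.1 ∧ isPrimeB x = true) →
      ((idxs.foldl (fun (st : PySem.Set Int × List Int) k =>
          let s := i + PySem.List.pyGetD S2 k 0
          if ¬ s ∈ st.1 then (PySem.Set.add st.1 s, if isPrimeB s then st.2 ++ [s] else st.2)
          else st) st).2
        = idxs.foldl (fun S k =>
            let s := i + PySem.List.pyGetD S2 k 0
            if isPrimeB s = true ∧ ¬ s ∈ S then S ++ [s] else S) S)
      ∧ (∀ x : Int, x ∈ idxs.foldl (fun S k =>
            let s := i + PySem.List.pyGetD S2 k 0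
            if isPrimeB s = true ∧ ¬ s ∈ S then S ++ [s] else S) S ↔
          x ∈ (idxs.foldl (fun (st : PySem.Set Int × List Int) k =>
            let s := i + PySem.List.pyGetD S2 k 0
            if ¬ s ∈ st.1 then (PySem.Set.add st.1 s, if isPrimeB s then st.2 ++ [s] else st.2)
            else st) st).1 ∧ isPrimeB x = true) := by
  intro idxs
  induction idxs with
  | nil =>
    intro S st h1 h2
    exact ⟨h1, h2⟩
  | cons k rest ih =>
    intro S st h1 h2
    simp only [List.foldl_cons]
    by_cases hseen : (i + PySem.List.pyGetD S2 k 0) ∈ st.1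
    · have hBc : ¬ ¬ ((i + PySem.List.pyGetD S2 k 0) ∈ st.1) := not_not_intro hseen
      rw [if_neg hBc]
      by_cases hp : isPrimeB (i + PySem.List.pyGetD S2 k 0) = true
      · have hsS : (i + PySem.List.pyGetD S2 k 0) ∈ S := (h2 _).mpr ⟨hseen, hp⟩
        have hAc : ¬ (isPrimeB (i + PySem.List.pyGetD S2 k 0) = true ∧
            ¬ (i + PySem.List.pyGetD S2 k 0) ∈ S) := fun hx => hx.2 hsS
        rw [if_neg hAc]
        exact ih S st h1 h2
      · have hAc : ¬ (isPrimeB (i + PySem.List.pyGetD S2 k 0) = true ∧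
            ¬ (i + PySem.List.pyGetD S2 k 0) ∈ S) := fun hx => hp hx.1
        rw [if_neg hAc]
        exact ih S st h1 h2
    · have hsS : (i + PySem.List.pyGetD S2 k 0) ∉ S := fun hx => hseen ((h2 _).mp hx).1
      rw [if_pos hseen]
      by_cases hp : isPrimeB (i + PySem.List.pyGetD S2 k 0) = true
      · have hAc : isPrimeB (i + PySem.List.pyGetD S2 k 0) = true ∧
            ¬ (i + PySem.List.pyGetD S2 k 0) ∈ S := ⟨hp, hsS⟩
        rw [if_pos hAc, if_pos hp]
        refine ih (S ++ [i + PySem.List.pyGetD S2 k 0]) _ (by simp [h1]) ?_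
        intro x
        simp only [PySem.Set.mem_add, List.mem_append, List.mem_singleton]
        constructor
        · rintro (hx | rfl)
          · have := (h2 x).mp hx; exact ⟨Or.inl this.1, this.2⟩
          · exact ⟨Or.inr rfl, hp⟩
        · rintro ⟨hx | rfl, hpx⟩
          · exact Or.inl ((h2 x).mpr ⟨hx, hpx⟩)
          · exact Or.inr rfl
      · have hAc : ¬ (isPrimeB (i + PySem.List.pyGetD S2 k 0) = true ∧
            ¬ (i + PySem.List.pyGetD S2 k 0) ∈ S) := fun hx => hp hx.1
        rw [if_neg hAc, if_neg hp]
        refine ih S _ (by simp [h1]) ?_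
        intro x
        simp only [PySem.Set.mem_add]
        constructor
        · intro hx
          have := (h2 x).mp hx; exact ⟨Or.inl this.1, this.2⟩
        · rintro ⟨hx | rfl, hpx⟩
          · exact (h2 x).mpr ⟨hx, hpx⟩
          · exact absurd hpx hp

lemma outer_inv (na nb : Int) (S2 order svals : List Int)
    (horder : order = PySem.List.sorted (PySem.List.pyRange 0 (PySem.List.len S2) 1)
        (fun k => PySem.List.pyGetD S2 k 0) false)
    (hsvals : svals = order.map (fun k => PySem.List.pyGetD S2 k 0)) :
    ∀ (S1 : List Int) (S : List Int) (st : PySem.Set Int × List Int),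
      st.2 = S → (∀ x : Int, x ∈ S ↔ x ∈ st.1 ∧ isPrimeB x = true) →
      (S1.foldl (fun (st : PySem.Set Int × List Int) i =>
          let l := bisectL svals (na - i)
          let r := bisectR svals (nb - i)
          (PySem.List.sorted (PySem.List.slice order (some l) (some r)) (fun x => x) false).foldl
            (fun (st : PySem.Set Int × List Int) k =>
              let s := i + PySem.List.pyGetD S2 k 0
              if ¬ s ∈ st.1 then (PySem.Set.add st.1 s, if isPrimeB s then st.2 ++ [s] else st.2)
              else st) st) st).2
        = S1.foldl (fun S i => S2.foldl (fun S j =>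
            let s := i + j
            if na ≤ s ∧ s ≤ nb ∧ isPrimeB s = true ∧ ¬ s ∈ S then S ++ [s] else S) S) S := by
  intro S1
  induction S1 with
  | nil =>
    intro S st h1 _
    simpa using h1
  | cons i rest ih =>
    intro S st h1 h2
    simp only [List.foldl_cons]
    rw [rowA_eq na nb i S2 S]
    dsimp only
    rw [row_eq S2 order svals (na - i) (nb - i) horder hsvals]
    obtain ⟨hinner1, hinner2⟩ := inner_inv i S2
      ((PySem.List.pyRange 0 (PySem.List.len S2) 1).filter
        (fun k => decide (na - i ≤ PySem.List.pyGetD S2 k 0 ∧ PySem.List.pyGetD S2 k 0 ≤ nb - i)))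
      S st h1 h2
    rw [← hinner1] at *
    exact ih _ _ rfl hinner2

-- ===== VERDICT (by name: the statement is the Claim_ definition above) =====
theorem result_spec : Claim_equal_result := by
  intro na nb S1 S2 _
  unfold Spec_result result result_alt
  simp only [prime_eq]
  exact (outer_inv na nb S2 _ _ rfl rfl S1 [] (PySem.Set.empty, []) rfl
    (by simp [PySem.Set.empty])).symm
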